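-- pv_equiv track=rewrite | github.com/SunakazeKun/pygapa | formats/rarc.py | __dir_identifier
-- ===== SOURCE A (Python) =====
-- def __dir_identifier(dir_name: str, is_first: bool) -> int:
--     # Root node uses "ROOT" as identifier
--     if is_first:
--         return 0x524F4F54
--
--     enc_upper = dir_name.upper().encode("ascii")
--     len_enc_name = len(enc_upper)
--
--     identifier = 0
--     for i in range(4):
--         identifier <<= 8
--         if i >= len_enc_name:
--             identifier += 0x20
--         else:
--             identifier += enc_upper[i]
--     return identifier
-- ===== SOURCE B (Python) =====
-- def __dir_identifier(dir_name: str, is_first: bool) -> int: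
--     # Root node uses "ROOT" as identifier
--     if is_first:
--         return 0x524F4F54
--     buf = dir_name.upper().encode("ascii")[:4].ljust(4, b" ")
--     return int.from_bytes(buf, "big")
-- ===== Notes on version B (the rewrite author's own statement) =====
-- stated objective: idiomatic
-- what changed: Replaces the 4-step shift-and-add loop with building a fixed 4-byte buffer (slice to 4, right-pad with spaces) and converting it in one int.from_bytes call.
import Mathlib
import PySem

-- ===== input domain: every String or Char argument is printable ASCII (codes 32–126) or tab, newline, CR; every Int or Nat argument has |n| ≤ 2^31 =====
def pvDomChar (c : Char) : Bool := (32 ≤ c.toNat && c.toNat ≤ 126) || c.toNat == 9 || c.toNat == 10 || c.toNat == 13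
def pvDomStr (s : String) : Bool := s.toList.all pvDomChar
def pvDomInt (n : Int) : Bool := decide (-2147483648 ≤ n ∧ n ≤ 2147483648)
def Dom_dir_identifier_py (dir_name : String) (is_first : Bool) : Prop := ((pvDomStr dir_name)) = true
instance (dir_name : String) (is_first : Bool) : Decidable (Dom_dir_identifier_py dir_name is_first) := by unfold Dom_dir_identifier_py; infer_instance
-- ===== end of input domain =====

-- B builds the 4-byte buffer (truncate to 4, right-pad with spaces) and converts it in one
-- big-endian fold (int.from_bytes), instead of A's 4-step shift-and-add loop; return value only.

-- ===== PORT A =====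
-- encode("ascii") yields the char codes; exact on the ASCII domain (Dom_), where it cannot raise
def dir_identifier_py (dir_name : String) (is_first : Bool) : Int :=
  if is_first then 0x524F4F54
  else
    let enc_upper : List Int := (PySem.Str.upper dir_name).toList.map (fun c => (c.toNat : Int))
    let len_enc_name : Int := enc_upper.length
    (PySem.List.pyRange 0 4 1).foldl (fun identifier i =>
      let identifier := identifier * 256  -- identifier <<= 8
      if len_enc_name ≤ i then identifier + 0x20
      else identifier + PySem.List.pyGetD enc_upper i 0) 0

-- ===== PORT B =====
-- buf = upper-cased codes sliced to 4 and right-padded with 0x20; int.from_bytes(buf,"big")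
-- is the big-endian fold over the bytes
def dir_identifier_py_alt (dir_name : String) (is_first : Bool) : Int :=
  if is_first then 0x524F4F54
  else
    let buf : List Int := ((PySem.Str.upper dir_name).toList.map (fun c => (c.toNat : Int))).take 4
    let buf := buf ++ List.replicate (4 - buf.length) 0x20
    buf.foldl (fun acc b => acc * 256 + b) 0

-- ===== PRECONDITION & SPEC =====
def Spec_dir_identifier_py (dir_name : String) (is_first : Bool) (out : Int) : Prop := out = dir_identifier_py_alt dir_name is_first
instance (dir_name : String) (is_first : Bool) (out : Int) : Decidable (Spec_dir_identifier_py dir_name is_first out) := by unfold Spec_dir_identifier_py; infer_instance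

-- ===== CLAIM (what is proved, stated in full; the proofs are below) =====
def Claim_equal_dir_identifier_py : Prop := ∀ (dir_name : String) (is_first : Bool), Dom_dir_identifier_py dir_name is_first → Spec_dir_identifier_py dir_name is_first (dir_identifier_py dir_name is_first)

-- ===== LEMMAS AND PROOFS =====


lemma fourbyte_key (l : List Int) :
    (PySem.List.pyRange 0 4 1).foldl (fun identifier i =>
      let identifier := identifier * 256
      if (l.length : Int) ≤ i then identifier + 0x20
      else identifier + PySem.List.pyGetD l i 0) 0
    = (l.take 4 ++ List.replicate (4 - (l.take 4).length) 0x20).foldl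
        (fun acc b => acc * 256 + b) 0 := by
  have hr : PySem.List.pyRange 0 4 1 = [0, 1, 2, 3] := by decide
  match l with
  | [] => rw [hr]; simp [List.foldl]
  | [a] => rw [hr]; simp [List.foldl, PySem.List.pyGetD, PySem.List.pyGet?, PySem.List.pyIdx?]
  | [a, b] => rw [hr]; simp [List.foldl, PySem.List.pyGetD, PySem.List.pyGet?, PySem.List.pyIdx?]
  | [a, b, c] => rw [hr]; simp [List.foldl, PySem.List.pyGetD, PySem.List.pyGet?, PySem.List.pyIdx?]
  | a :: b :: c :: d :: t =>
      rw [hr]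
      have ht : (0 : Int) ≤ t.length := Int.natCast_nonneg _
      simp [List.foldl, PySem.List.pyGetD, PySem.List.pyGet?, PySem.List.pyIdx?]
      split_ifs <;> try omega
      simp

-- ===== VERDICT (by name: the statement is the Claim_ definition above) =====
theorem dir_identifier_py_spec : Claim_equal_dir_identifier_py := by
  intro dir_name is_first _
  unfold Spec_dir_identifier_py
  cases is_first with
  | true => simp [dir_identifier_py, dir_identifier_py_alt]
  | false =>
      show dir_identifier_py dir_name false = dir_identifier_py_alt dir_name false
      unfold dir_identifier_py dir_identifier_py_alt
      simp only [Bool.false_eq_true, if_false]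
      exact fourbyte_key _
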